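-- pv_equiv track=rewrite | github.com/theSLWayne/DuplicateFilesRemover | dr.py | getSameSize
-- ===== SOURCE A (Python) =====
-- def getSameSize(fileSizes):
--     """
--
--     Return a list of indexes in the given list that have similar values
--
--     :param fileSizes: List containing all filesizes of a directory
--     :return: List of indexes of the fileSizes list that have similar filesize values
--     """
--
--     sameSize = list()
--     for i in range(len(fileSizes)-1):
--         for j in range(i+1, len(fileSizes)):
--             if(fileSizes[i] == fileSizes[j]):
--                 n = 0
--                 for m in range(len(sameSize)):
--                     if(j == sameSize[m]):
--                         n = n + 1
--                 if(n == 0):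
--                     sameSize.append(j)
--                 k = 0
--                 for l in range(len(sameSize)):
--                     if(i == sameSize[l]):
--                         k = k + 1
--                 if(k == 0):
--                     sameSize.append(i)
--
--     return sameSize
-- ===== SOURCE B (Python) =====
-- def getSameSize(fileSizes):
--     """
--     Return a list of indexes in the given list that have similar values.
--
--     Groups indices by value at their first occurrence: for each value seen
--     for the first time at index i, collect all later indices js with the same
--     value and emit js[0], i, js[1], js[2], ...  (the order A produces).
--     """
--     out = []
--     seen = set()
--     for i, v in enumerate(fileSizes):
--         if v not in seen:
--             seen.add(v)
--             js = [j for j in range(i + 1, len(fileSizes)) if fileSizes[j] == v]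
--             if js:
--                 out += [js[0], i] + js[1:]
--     return out
-- ===== Notes on version B (the rewrite author's own statement) =====
-- stated objective: faster
-- what changed: Replaces A's all-pairs double loop with per-element membership-count scans over the growing output by a single left-to-right pass that, at each first occurrence of a value, collects that value's later indices once and emits the whole group (js[0], i, js[1:]) with no membership scans of the output.
import Mathlib
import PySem

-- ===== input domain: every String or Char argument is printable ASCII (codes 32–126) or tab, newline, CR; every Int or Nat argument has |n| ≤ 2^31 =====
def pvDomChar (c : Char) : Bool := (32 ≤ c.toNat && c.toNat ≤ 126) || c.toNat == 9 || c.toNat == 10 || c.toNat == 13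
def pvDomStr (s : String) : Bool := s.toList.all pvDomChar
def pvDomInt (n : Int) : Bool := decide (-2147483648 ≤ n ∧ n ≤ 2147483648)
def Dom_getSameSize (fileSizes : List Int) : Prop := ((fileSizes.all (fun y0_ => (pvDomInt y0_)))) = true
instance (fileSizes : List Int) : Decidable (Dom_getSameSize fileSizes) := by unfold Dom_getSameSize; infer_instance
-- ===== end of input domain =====

-- B groups indices by value at each first occurrence and emits whole groups at once,
-- instead of A's all-pairs loop with membership-count scans over the growing output (objective: faster).

-- ===== PORT A =====
-- the two Python loops 'for m in range(len(sameSize)): if j == sameSize[m]: n += 1' count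
-- occurrences of j in sameSize; ported as elementwise folds over sameSize (same traversal, same counts)
def getSameSize (fileSizes : List Int) : List Int :=
  (PySem.List.pyRange 0 ((fileSizes.length : Int) - 1) 1).foldl (fun sameSize i =>
    (PySem.List.pyRange (i + 1) (fileSizes.length : Int) 1).foldl (fun sameSize j =>
      if PySem.List.pyGet? fileSizes i = PySem.List.pyGet? fileSizes j then
        let sameSize1 :=
          let n : Int := sameSize.foldl (fun n x => if j = x then n + 1 else n) 0
          if n = 0 then sameSize ++ [j] else sameSize
        let k : Int := sameSize1.foldl (fun k x => if i = x then k + 1 else k) 0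
        if k = 0 then sameSize1 ++ [i] else sameSize1
      else sameSize) sameSize) []

-- ===== PORT B =====
def getSameSize_alt (fileSizes : List Int) : List Int :=
  ((PySem.List.enumerate fileSizes 0).foldl
    (fun (st : List Int × PySem.Set Int) iv =>
      if PySem.Set.contains st.2 iv.2 then st
      else
        let seen := PySem.Set.add st.2 iv.2
        let js := (PySem.List.pyRange (iv.1 + 1) (fileSizes.length : Int) 1).filter
                    (fun j => PySem.List.pyGet? fileSizes j == some iv.2)
        match js with
        | [] => (st.1, seen)
        | j0 :: rest => (st.1 ++ j0 :: iv.1 :: rest, seen))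
    ([], PySem.Set.empty)).1

-- ===== PRECONDITION & SPEC =====
def Spec_getSameSize (fileSizes : List Int) (out : List Int) : Prop := out = getSameSize_alt fileSizes
instance (fileSizes : List Int) (out : List Int) : Decidable (Spec_getSameSize fileSizes out) := by unfold Spec_getSameSize; infer_instance

-- ===== CLAIM (what is proved, stated in full; the proofs are below) =====
def Claim_equal_getSameSize : Prop := ∀ (fileSizes : List Int), Dom_getSameSize fileSizes → Spec_getSameSize fileSizes (getSameSize fileSizes)

-- ===== LEMMAS AND PROOFS =====

-- proof-only helpers: a reference computation pvR (group per first occurrence) that both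
-- ports are proved equal to, and a membership characterization pvIn of its partial results.

-- A's inner-loop body, named so lemmas can speak about it (definitionally A's lambda)
def pvAin (xs : List Int) (i : Int) (sameSize : List Int) (j : Int) : List Int :=
  if PySem.List.pyGet? xs i = PySem.List.pyGet? xs j then
    let sameSize1 :=
      let n : Int := sameSize.foldl (fun n x => if j = x then n + 1 else n) 0
      if n = 0 then sameSize ++ [j] else sameSize
    let k : Int := sameSize1.foldl (fun k x => if i = x then k + 1 else k) 0
    if k = 0 then sameSize1 ++ [i] else sameSize1
  else sameSize

-- B's loop body, named (definitionally B's lambda)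
def pvBstep (xs : List Int) (st : List Int × PySem.Set Int) (iv : Int × Int) :
    List Int × PySem.Set Int :=
  if PySem.Set.contains st.2 iv.2 then st
  else
    let seen := PySem.Set.add st.2 iv.2
    let js := (PySem.List.pyRange (iv.1 + 1) (xs.length : Int) 1).filter
                (fun j => PySem.List.pyGet? xs j == some iv.2)
    match js with
    | [] => (st.1, seen)
    | j0 :: rest => (st.1 ++ j0 :: iv.1 :: rest, seen)

-- the later indices (in [i+1, a)) holding the same value as index i
def pvM (xs : List Int) (i a : Int) : List Int :=
  (PySem.List.pyRange (i + 1) a 1).filter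
    (fun j => PySem.List.pyGet? xs j == PySem.List.pyGet? xs i)

-- the group emitted for first occurrence i with later matches js: js[0], i, js[1:]
def pvEmit (i : Int) : List Int → List Int
  | [] => []
  | j :: r => j :: i :: r

-- index k is the first occurrence of its value
abbrev pvFirst (xs : List Int) (k : Nat) : Prop := ∀ p, p < k → xs[p]? ≠ xs[k]?

-- reference result after outer indices < k have been processed
def pvR (xs : List Int) : Nat → List Int
  | 0 => []
  | k + 1 =>
      if pvFirst xs k then pvR xs k ++ pvEmit (k : Int) (pvM xs (k : Int) (xs.length : Int))
      else pvR xs k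

-- x lies in pvR xs k: x is an index t whose value has a duplicated group whose first occurrence p is < k
def pvIn (xs : List Int) (k : Nat) (x : Int) : Prop :=
  ∃ p q t : Nat, x = (t : Int) ∧ t < xs.length ∧ p < k ∧ p < q ∧ q < xs.length ∧
    xs[p]? = xs[q]? ∧ xs[p]? = xs[t]? ∧ ∀ r, r < p → xs[r]? ≠ xs[p]?

lemma mem_pvEmit (i x : Int) (js : List Int) :
    x ∈ pvEmit i js ↔ (js ≠ [] ∧ x = i) ∨ x ∈ js := by
  cases js with
  | nil => simp [pvEmit]
  | cons j r => simp [pvEmit]; tauto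

lemma mem_pvM (xs : List Int) (i : Nat) (a x : Int) :
    x ∈ pvM xs (i : Int) a ↔ ∃ t : Nat, x = (t : Int) ∧ i < t ∧ (t : Int) < a ∧ xs[t]? = xs[i]? := by
  unfold pvM
  simp only [List.mem_filter, PySem.List.mem_pyRange_one, beq_iff_eq, PySem.List.pyGet?_natCast]
  constructor
  · rintro ⟨⟨h1, h2⟩, h3⟩
    have hx0 : 0 ≤ x := by omega
    have hxt : x = ((x.toNat : Nat) : Int) := by omega
    refine ⟨x.toNat, hxt, by omega, by omega, ?_⟩
    rw [hxt, PySem.List.pyGet?_natCast] at h3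
    exact h3
  · rintro ⟨t, rfl, h1, h2, h3⟩
    refine ⟨⟨by omega, h2⟩, ?_⟩
    simpa using h3

lemma pvM_ne_nil_iff (xs : List Int) (i : Nat) (a : Int) :
    pvM xs (i : Int) a ≠ [] ↔ ∃ q : Nat, i < q ∧ (q : Int) < a ∧ xs[q]? = xs[i]? := by
  rw [← List.isEmpty_eq_false_iff, List.isEmpty_eq_false_iff_exists_mem]
  constructor
  · rintro ⟨x, hx⟩
    obtain ⟨t, rfl, h1, h2, h3⟩ := (mem_pvM xs i a x).1 hx
    exact ⟨t, h1, h2, h3⟩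
  · rintro ⟨q, h1, h2, h3⟩
    exact ⟨(q : Int), (mem_pvM xs i a _).2 ⟨q, rfl, h1, h2, h3⟩⟩

-- counting loop of A is a membership test
lemma pvCount_eq_zero (l : List Int) (j : Int) :
    (l.foldl (fun n x => if j = x then n + 1 else n) (0 : Int)) = 0 ↔ j ∉ l := by
  rw [PySem.List.foldl_ite_add_one (p := fun x => j = x)]
  simp only [zero_add, Int.natCast_eq_zero, List.countP_eq_zero]
  constructor
  · intro h hj
    have := h j hj
    simp at this
  · intro h x hx
    simp only [decide_eq_true_eq]
    rintro rfl
    exact h hx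

lemma exists_min_first (xs : List Int) (i : Nat) (h : ¬ pvFirst xs i) :
    ∃ p, p < i ∧ xs[p]? = xs[i]? ∧ ∀ r, r < p → xs[r]? ≠ xs[p]? := by
  unfold pvFirst at h
  push_neg at h
  obtain ⟨p0, hp0, he⟩ := h
  have H : ∃ p, xs[p]? = xs[i]? := ⟨p0, he⟩
  refine ⟨Nat.find H, lt_of_le_of_lt (Nat.find_min' H he) hp0, Nat.find_spec H, ?_⟩
  intro r hr hre
  exact Nat.find_min H hr (hre.trans (Nat.find_spec H))

-- characterization of membership in pvR
lemma mem_pvR (xs : List Int) : ∀ k x, x ∈ pvR xs k ↔ pvIn xs k x := by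
  intro k
  induction k with
  | zero =>
    intro x
    simp only [pvR, List.not_mem_nil, false_iff, pvIn]
    rintro ⟨p, q, t, _, _, hp, _⟩
    omega
  | succ k ih =>
    intro x
    by_cases hf : pvFirst xs k
    · rw [pvR, if_pos hf]
      by_cases hk : k < xs.length
      · simp only [List.mem_append, mem_pvEmit, pvM_ne_nil_iff, mem_pvM, ih]
        constructor
        · rintro (hin | ⟨⟨q, hq1, hq2, hq3⟩, rfl⟩ | ⟨t, rfl, ht1, ht2, ht3⟩)
          · obtain ⟨p, q, t, h⟩ := hin
            exact ⟨p, q, t, h.1, h.2.1, by omega, h.2.2.2.1, h.2.2.2.2.1, h.2.2.2.2.2.1,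
              h.2.2.2.2.2.2.1, h.2.2.2.2.2.2.2⟩
          · exact ⟨k, q, k, rfl, hk, by omega, hq1, by omega, hq3.symm, rfl, hf⟩
          · exact ⟨k, t, t, rfl, by omega, by omega, ht1, by omega, ht3.symm, ht3.symm, hf⟩
        · rintro ⟨p, q, t, rfl, ht, hpk, hpq, hq, hpqv, hptv, hmin⟩
          by_cases hpk' : p < k
          · exact Or.inl ⟨p, q, t, rfl, ht, hpk', hpq, hq, hpqv, hptv, hmin⟩
          · have hpk2 : p = k := by omega
            subst hpk2
            by_cases htp : t = p
            · subst htp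
              exact Or.inr (Or.inl ⟨⟨q, hpq, by omega, hpqv.symm⟩, rfl⟩)
            · have htgt : p < t := by
                rcases Nat.lt_or_ge t p with h | h
                · exact absurd hptv.symm (hf t h)
                · omega
              exact Or.inr (Or.inr ⟨t, rfl, htgt, by omega, hptv.symm⟩)
      · -- k ≥ length: the emitted group is empty (no q < length with k < q), and p = k impossible
        have hM : pvM xs (k : Int) (xs.length : Int) = [] := by
          rcases List.eq_nil_or_concat' (pvM xs (k : Int) (xs.length : Int)) with h | ⟨l', y, h⟩
          · exact h
          · exfalso
            have : y ∈ pvM xs (k : Int) (xs.length : Int) := by rw [h]; simp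
            obtain ⟨t, _, h1, h2, _⟩ := (mem_pvM xs k _ y).1 this
            omega
        rw [hM]
        simp only [pvEmit, List.append_nil, ih]
        constructor
        · rintro ⟨p, q, t, h⟩
          exact ⟨p, q, t, h.1, h.2.1, by omega, h.2.2.2.1, h.2.2.2.2.1, h.2.2.2.2.2.1,
            h.2.2.2.2.2.2.1, h.2.2.2.2.2.2.2⟩
        · rintro ⟨p, q, t, rfl, ht, hpk, hpq, hq, h⟩
          exact ⟨p, q, t, rfl, ht, by omega, hpq, hq, h.1, h.2.1, h.2.2⟩
    · rw [pvR, if_neg hf]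
      rw [ih]
      constructor
      · rintro ⟨p, q, t, h⟩
        exact ⟨p, q, t, h.1, h.2.1, by omega, h.2.2.2.1, h.2.2.2.2.1, h.2.2.2.2.2.1,
          h.2.2.2.2.2.2.1, h.2.2.2.2.2.2.2⟩
      · rintro ⟨p, q, t, rfl, ht, hpk, hpq, hq, hpqv, hptv, hmin⟩
        have hpk' : p < k := by
          rcases Nat.lt_or_ge p k with h | h
          · exact h
          · exfalso
            have hpk2 : p = k := by omega
            subst hpk2
            exact hf hmin
        exact ⟨p, q, t, rfl, ht, hpk', hpq, hq, hpqv, hptv, hmin⟩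

-- step of pvM on the right edge of the range
lemma pvM_succ (xs : List Int) (i a : Nat) (h : i < a) :
    pvM xs (i : Int) ((a : Int) + 1)
      = pvM xs (i : Int) (a : Int)
        ++ (if PySem.List.pyGet? xs (a : Int) == PySem.List.pyGet? xs (i : Int) then [(a : Int)] else []) := by
  unfold pvM
  rw [PySem.List.pyRange_one_succ_right (by omega : (i : Int) + 1 ≤ (a : Int)), List.filter_append]
  simp only [List.filter]
  split <;> simp_all

-- inner loop of A at a first occurrence i builds the emitted group
lemma pvA_inner_first (xs : List Int) (i : Nat) (hi : i < xs.length) (hf : pvFirst xs i) :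
    ∀ m : Nat, i + 1 + m ≤ xs.length →
      (PySem.List.pyRange ((i : Int) + 1) ((i + 1 + m : Nat) : Int) 1).foldl
          (pvAin xs (i : Int)) (pvR xs i)
        = pvR xs i ++ pvEmit (i : Int) (pvM xs (i : Int) ((i + 1 + m : Nat) : Int)) := by
  intro m
  induction m with
  | zero =>
    intro _
    rw [PySem.List.pyRange_one_eq_nil (by push_cast; omega)]
    have hM0 : pvM xs (i : Int) ((i + 1 + 0 : Nat) : Int) = [] := by
      unfold pvM
      rw [PySem.List.pyRange_one_eq_nil (by push_cast; omega)]
      rfl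
    rw [hM0]
    simp [pvEmit]
  | succ m ihm =>
    intro hle
    have ha : i + 1 + m < xs.length := by omega
    have hsplit : ((i + 1 + (m + 1) : Nat) : Int) = ((i + 1 + m : Nat) : Int) + 1 := by push_cast; ring
    rw [hsplit, PySem.List.pyRange_one_succ_right (by push_cast; omega), List.foldl_append,
      ihm (by omega)]
    set a : Nat := i + 1 + m with hadef
    have haa : ((i + 1 + m : Nat) : Int) = (a : Int) := by rw [hadef]
    rw [haa, pvM_succ xs i a (by omega)]
    simp only [List.foldl_cons, List.foldl_nil]
    by_cases hv : xs[a]? = xs[i]?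
    · have hcond : PySem.List.pyGet? xs (i : Int) = PySem.List.pyGet? xs (a : Int) := by
        simp [PySem.List.pyGet?_natCast, hv]
      have hcond' : (PySem.List.pyGet? xs (a : Int) == PySem.List.pyGet? xs (i : Int)) = true := by
        simp [PySem.List.pyGet?_natCast, hv]
      rw [hcond', if_pos rfl]
      unfold pvAin
      rw [if_pos hcond]
      have hanotR : ((a : Int)) ∉ pvR xs i := by
        rw [mem_pvR]
        rintro ⟨p, q, t, hta, ht, hp, hpq, hq, hpqv, hptv, hmin⟩
        have hat : a = t := by exact_mod_cast hta
        subst hat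
        exact hf p hp (hptv.trans hv)
      have hanotE : ((a : Int)) ∉ pvEmit (i : Int) (pvM xs (i : Int) (a : Int)) := by
        rw [mem_pvEmit]
        rintro (⟨_, hai⟩ | hmem)
        · have : (a : Nat) = i := by exact_mod_cast hai
          omega
        · obtain ⟨t, hta, _, h2, _⟩ := (mem_pvM xs i _ _).1 hmem
          have : a = t := by exact_mod_cast hta
          omega
      have hcnt1 : ((pvR xs i ++ pvEmit (i : Int) (pvM xs (i : Int) (a : Int))).foldl
          (fun n x => if (a : Int) = x then n + 1 else n) (0 : Int)) = 0 := by
        rw [pvCount_eq_zero]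
        simp only [List.mem_append]
        rintro (h | h)
        · exact hanotR h
        · exact hanotE h
      rw [if_pos hcnt1]
      have hinotR : ((i : Int)) ∉ pvR xs i := by
        rw [mem_pvR]
        rintro ⟨p, q, t, hta, ht, hp, hpq, hq, hpqv, hptv, hmin⟩
        have hit : i = t := by exact_mod_cast hta
        subst hit
        exact hf p hp hptv
      rcases List.eq_nil_or_concat' (pvM xs (i : Int) (a : Int)) with hM | ⟨l', y, hM⟩
      · -- no earlier match: i is appended too
        rw [hM]
        have hcnt2 : ((pvR xs i ++ pvEmit (i : Int) [] ++ [(a : Int)]).foldl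
            (fun n x => if (i : Int) = x then n + 1 else n) (0 : Int)) = 0 := by
          rw [pvCount_eq_zero]
          simp only [pvEmit, List.append_nil, List.mem_append, List.mem_singleton]
          rintro (h | h)
          · exact hinotR h
          · have : i = a := by exact_mod_cast h
            omega
        rw [if_pos hcnt2]
        simp [pvEmit]
      · -- some earlier match: i is already inside the emitted block
        have hne : pvM xs (i : Int) (a : Int) ≠ [] := by rw [hM]; simp
        obtain ⟨j0, rest, hM2⟩ := List.exists_cons_of_ne_nil hne
        rw [hM2]
        have hcnt2 : ¬ ((pvR xs i ++ pvEmit (i : Int) (j0 :: rest) ++ [(a : Int)]).foldl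
            (fun n x => if (i : Int) = x then n + 1 else n) (0 : Int)) = 0 := by
          rw [pvCount_eq_zero]
          simp [pvEmit]
        rw [if_neg hcnt2]
        simp [pvEmit]
    · have hcond : ¬ PySem.List.pyGet? xs (i : Int) = PySem.List.pyGet? xs (a : Int) := by
        simp only [PySem.List.pyGet?_natCast]
        exact fun h => hv h.symm
      have hcond' : (PySem.List.pyGet? xs (a : Int) == PySem.List.pyGet? xs (i : Int)) = false := by
        simp only [PySem.List.pyGet?_natCast, beq_eq_false_iff_ne, ne_eq]
        exact hv
      rw [hcond', if_neg (by simp)]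
      unfold pvAin
      rw [if_neg hcond]
      simp

-- inner loop of A at a non-first occurrence i changes nothing
lemma pvA_inner_notfirst (xs : List Int) (i : Nat) (hi : i < xs.length) (hf : ¬ pvFirst xs i) :
    ∀ m : Nat, i + 1 + m ≤ xs.length →
      (PySem.List.pyRange ((i : Int) + 1) ((i + 1 + m : Nat) : Int) 1).foldl
          (pvAin xs (i : Int)) (pvR xs i) = pvR xs i := by
  obtain ⟨p, hpi, hpv, hpmin⟩ := exists_min_first xs i hf
  intro m
  induction m with
  | zero =>
    intro _
    rw [PySem.List.pyRange_one_eq_nil (by push_cast; omega)]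
    rfl
  | succ m ihm =>
    intro hle
    have ha : i + 1 + m < xs.length := by omega
    have hsplit : ((i + 1 + (m + 1) : Nat) : Int) = ((i + 1 + m : Nat) : Int) + 1 := by push_cast; ring
    rw [hsplit, PySem.List.pyRange_one_succ_right (by push_cast; omega), List.foldl_append,
      ihm (by omega)]
    set a : Nat := i + 1 + m with hadef
    have haa : ((i + 1 + m : Nat) : Int) = (a : Int) := by rw [hadef]
    rw [haa]
    simp only [List.foldl_cons, List.foldl_nil]
    unfold pvAin
    by_cases hv : xs[a]? = xs[i]?
    · rw [if_pos (by simp [PySem.List.pyGet?_natCast, hv])]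
      have hainR : ((a : Int)) ∈ pvR xs i := by
        rw [mem_pvR]
        exact ⟨p, i, a, rfl, by omega, hpi, hpi, hi, hpv, hpv.trans hv.symm, hpmin⟩
      have hiinR : ((i : Int)) ∈ pvR xs i := by
        rw [mem_pvR]
        exact ⟨p, i, i, rfl, hi, hpi, hpi, hi, hpv, hpv, hpmin⟩
      have hcnt1 : ¬ ((pvR xs i).foldl (fun n x => if (a : Int) = x then n + 1 else n) (0 : Int)) = 0 := by
        rw [pvCount_eq_zero]; simp [hainR]
      rw [if_neg hcnt1]
      have hcnt2 : ¬ ((pvR xs i).foldl (fun n x => if (i : Int) = x then n + 1 else n) (0 : Int)) = 0 := by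
        rw [pvCount_eq_zero]; simp [hiinR]
      rw [if_neg hcnt2]
    · rw [if_neg (by simp only [PySem.List.pyGet?_natCast]; exact fun h => hv h.symm)]

-- one full outer iteration of A advances pvR by one step
lemma pvA_outer_step (xs : List Int) (i : Nat) (hi : i < xs.length) :
    (PySem.List.pyRange ((i : Int) + 1) ((xs.length : Nat) : Int) 1).foldl
        (pvAin xs (i : Int)) (pvR xs i) = pvR xs (i + 1) := by
  have hlen : ((xs.length : Nat) : Int) = ((i + 1 + (xs.length - (i + 1)) : Nat) : Int) := by
    have h : i + 1 + (xs.length - (i + 1)) = xs.length := by omega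
    rw [h]
  by_cases hf : pvFirst xs i
  · rw [hlen, pvA_inner_first xs i hi hf (xs.length - (i + 1)) (by omega), pvR, if_pos hf]
    rw [← hlen]
  · rw [hlen, pvA_inner_notfirst xs i hi hf (xs.length - (i + 1)) (by omega), pvR, if_neg hf]

-- A's outer loop computes pvR
lemma pvA_outer (xs : List Int) :
    ∀ k : Nat, k ≤ xs.length →
      (PySem.List.pyRange 0 ((k : Nat) : Int) 1).foldl
          (fun s i => (PySem.List.pyRange (i + 1) ((xs.length : Nat) : Int) 1).foldl (pvAin xs i) s) []
        = pvR xs k := by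
  intro k
  induction k with
  | zero => intro _; rw [PySem.List.pyRange_one_eq_nil (by omega)]; rfl
  | succ k ih =>
    intro hk
    have hsplit : (((k + 1 : Nat)) : Int) = ((k : Nat) : Int) + 1 := by push_cast; ring
    rw [hsplit, PySem.List.pyRange_one_succ_right (by push_cast; omega), List.foldl_append,
      ih (by omega)]
    simp only [List.foldl_cons, List.foldl_nil]
    exact pvA_outer_step xs k (by omega)

lemma pvA_eq_pvR (xs : List Int) : getSameSize xs = pvR xs xs.length := by
  have hA : getSameSize xs
      = (PySem.List.pyRange 0 ((xs.length : Int) - 1) 1).foldl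
          (fun s i => (PySem.List.pyRange (i + 1) ((xs.length : Nat) : Int) 1).foldl (pvAin xs i) s) [] := rfl
  rw [hA]
  cases hxs : xs.length with
  | zero =>
    rw [PySem.List.pyRange_one_eq_nil (by norm_num)]
    rfl
  | succ k =>
    have h1 : (((k + 1 : Nat) : Int) - 1) = ((k : Nat) : Int) := by push_cast; ring
    rw [h1]
    have h2 := pvA_outer xs k (by omega)
    rw [hxs] at h2
    rw [h2]
    -- the last index contributes nothing: its match range is empty
    have hM : pvM xs (k : Int) ((k + 1 : Nat) : Int) = [] := by
      unfold pvM
      rw [PySem.List.pyRange_one_eq_nil (by push_cast; omega)]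
      rfl
    rw [pvR]
    split
    · rw [hxs, hM]
      simp [pvEmit]
    · rfl

-- membership in seen-set ↔ not a first occurrence
lemma pvFirst_iff_not_mem_take (xs : List Int) (k : Nat) (hk : k < xs.length) :
    pvFirst xs k ↔ xs[k] ∉ xs.take k := by
  constructor
  · intro hf hmem
    obtain ⟨p, hp, hpe⟩ := List.getElem_of_mem hmem
    have hp' : p < k := by
      have hp2 := hp
      rw [List.length_take] at hp2
      omega
    have : xs[p]? = xs[k]? := by
      rw [List.getElem?_eq_getElem (by omega), List.getElem?_eq_getElem hk]
      rw [List.getElem_take] at hpe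
      simp [hpe]
    exact hf p hp' this
  · intro hmem p hp hpe
    apply hmem
    rw [List.getElem?_eq_getElem (by omega), List.getElem?_eq_getElem hk] at hpe
    have : xs[p] = xs[k] := by simpa using hpe
    rw [← this]
    exact List.mem_take_iff_getElem.2 ⟨p, by omega, rfl⟩

-- B's loop invariant: output so far is pvR, seen is the set of earlier values
lemma pvB_inv (xs : List Int) :
    ∀ k : Nat, k ≤ xs.length →
      ((PySem.List.enumerate xs 0).take k).foldl (pvBstep xs) ([], PySem.Set.empty)
        = (pvR xs k, PySem.Set.ofList (xs.take k)) := by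
  intro k
  induction k with
  | zero => intro _; rfl
  | succ k ih =>
    intro hk
    have hk' : k < xs.length := by omega
    have hkE : k < (PySem.List.enumerate xs 0).length := by
      rw [PySem.List.length_enumerate]; omega
    rw [List.take_succ, List.foldl_append, ih (by omega)]
    have hEk : (PySem.List.enumerate xs 0)[k]? = some ((k : Int), xs[k]) := by
      rw [PySem.List.getElem?_enumerate, List.getElem?_eq_getElem hk']
      simp
    rw [hEk]
    simp only [Option.toList_some, List.foldl_cons, List.foldl_nil]
    have htake : xs.take (k + 1) = xs.take k ++ [xs[k]] := by
      rw [List.take_succ, List.getElem?_eq_getElem hk']; rfl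
    have hofl : PySem.Set.ofList (xs.take (k + 1))
        = PySem.Set.add (PySem.Set.ofList (xs.take k)) xs[k] := by
      rw [PySem.Set.ofList_eq_foldl, PySem.Set.ofList_eq_foldl, htake, List.foldl_append]
      rfl
    unfold pvBstep
    by_cases hseen : xs[k] ∈ xs.take k
    · have hcont : PySem.Set.contains (PySem.Set.ofList (xs.take k)) xs[k] = true := by
        simp [PySem.Set.contains_iff, PySem.Set.mem_ofList, hseen]
      rw [if_pos (by simpa using hcont)]
      have hnf : ¬ pvFirst xs k := fun hf => (pvFirst_iff_not_mem_take xs k hk').1 hf hseen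
      rw [pvR, if_neg hnf, hofl]
      have : PySem.Set.add (PySem.Set.ofList (xs.take k)) xs[k] = PySem.Set.ofList (xs.take k) := by
        unfold PySem.Set.add
        rw [if_pos hcont]
      rw [this]
    · have hcont : PySem.Set.contains (PySem.Set.ofList (xs.take k)) xs[k] = false := by
        simp [PySem.Set.contains_iff, PySem.Set.mem_ofList]
        exact hseen
      rw [if_neg (by simp; exact hseen)]
      have hf : pvFirst xs k := (pvFirst_iff_not_mem_take xs k hk').2 hseen
      have hjs : ((PySem.List.pyRange ((k : Int) + 1) ((xs.length : Nat) : Int) 1).filter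
            (fun j => PySem.List.pyGet? xs j == some xs[k]))
          = pvM xs (k : Int) ((xs.length : Nat) : Int) := by
        unfold pvM
        congr 1
        funext j
        rw [show PySem.List.pyGet? xs (k : Int) = some xs[k] by
          rw [PySem.List.pyGet?_natCast, List.getElem?_eq_getElem hk']]
      simp only [hjs]
      rw [pvR, if_pos hf, hofl]
      rcases hMc : pvM xs (k : Int) ((xs.length : Nat) : Int) with _ | ⟨j0, rest⟩
      · simp [pvEmit]
      · simp [pvEmit]

lemma pvB_eq_pvR (xs : List Int) : getSameSize_alt xs = pvR xs xs.length := by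
  have hB : getSameSize_alt xs
      = ((PySem.List.enumerate xs 0).foldl (pvBstep xs) ([], PySem.Set.empty)).1 := rfl
  rw [hB]
  have h := pvB_inv xs xs.length (le_refl _)
  rw [List.take_of_length_le (by rw [PySem.List.length_enumerate])] at h
  rw [h]

-- ===== VERDICT (by name: the statement is the Claim_ definition above) =====
theorem getSameSize_spec : Claim_equal_getSameSize := by
  intro xs _
  unfold Spec_getSameSize
  rw [pvA_eq_pvR, pvB_eq_pvR]
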